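-- pv_equiv track=rewrite | github.com/zisankarsatar/DataStructuresCoding | interview_questions/patterns.py | patterns
-- ===== SOURCE A (Python) =====
-- def patterns(str, all):
--     #if str is empty
--     if len(str) == 0:
--         return all
--
--     #if str[0
--     if str[0] != "?":
--         for i in range(0, len(all)):
--             all[i].append(str[0])
--     else:
--         for i in range(0, len(all)):
--             temp = list(all[i])
--             all.append(temp)
--         for i in range(0, len(all)):
--             if i < len(all)/2:
--                 all[i].append('0')
--             else:
--                 all[i].append('1')
--
--     return patterns(str[1:], all)
-- ===== SOURCE B (Python) =====
-- def patterns(str, all):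
--     pats = [""]
--     for ch in str:
--         if ch == "?":
--             pats = [p + "0" for p in pats] + [p + "1" for p in pats]
--         else:
--             pats = [p + ch for p in pats]
--     return [row + list(p) for p in pats for row in all]
-- ===== Notes on version B (the rewrite author's own statement) =====
-- stated objective: simpler
-- what changed: Replaces A's tail recursion with in-place index loops (append-to-each, duplicate-by-appending-copies, then label first/second half by i < len/2) by a single fold over the characters that rebuilds the list functionally with map/append comprehensions; return value only - A mutates the passed list, B does not.
import Mathlib
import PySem

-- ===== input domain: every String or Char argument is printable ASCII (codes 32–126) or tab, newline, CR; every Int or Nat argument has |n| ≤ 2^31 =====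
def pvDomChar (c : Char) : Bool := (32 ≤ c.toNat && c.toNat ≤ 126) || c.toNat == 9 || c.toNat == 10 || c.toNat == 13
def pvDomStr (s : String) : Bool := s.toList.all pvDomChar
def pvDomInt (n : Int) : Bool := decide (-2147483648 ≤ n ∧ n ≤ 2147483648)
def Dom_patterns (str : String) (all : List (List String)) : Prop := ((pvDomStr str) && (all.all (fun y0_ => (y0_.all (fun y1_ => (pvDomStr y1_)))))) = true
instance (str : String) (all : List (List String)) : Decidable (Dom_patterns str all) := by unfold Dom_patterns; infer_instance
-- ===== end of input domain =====

-- B replaces A's tail recursion with in-place index loops by one fold building each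
-- generation functionally (map/append comprehensions); equivalence is about the RETURN
-- value only — A mutates the passed list in place, B does not.

-- ===== PORT A =====
-- literal port of A's recursion; Python indices all[i] are always in range here, so
-- `acc.getD i []` reads exactly what Python's all[i] reads; `2 * i < acc.length` is
-- exactly Python's `i < len(all)/2` (a real-number comparison) on these integers.
-- `for i in range(0, len(all)): all[i].append(str[0])`
def pvLoopAppend (c : Char) (all : List (List String)) : List (List String) :=
  (List.range all.length).foldl
    (fun acc i => acc.set i (acc.getD i [] ++ [String.ofList [c]])) all

-- `for i in range(0, len(all)): temp = list(all[i]); all.append(temp)`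
def pvLoopDup (all : List (List String)) : List (List String) :=
  (List.range all.length).foldl (fun acc i => acc ++ [acc.getD i []]) all

-- `for i in range(0, len(all)): if i < len(all)/2: all[i].append('0') else: all[i].append('1')`
def pvLoopLabel (all2 : List (List String)) : List (List String) :=
  (List.range all2.length).foldl
    (fun acc i => acc.set i (if 2 * i < acc.length then acc.getD i [] ++ ["0"]
                             else acc.getD i [] ++ ["1"])) all2

def patternsA : List Char → List (List String) → List (List String)
  | [], all => all
  | c :: rest, all =>
    if c ≠ '?' then
      patternsA rest (pvLoopAppend c all)
    else
      patternsA rest (pvLoopLabel (pvLoopDup all))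

def patterns (str : String) (all : List (List String)) : List (List String) :=
  patternsA str.toList all

-- ===== PORT B =====
-- B first expands the wildcard string alone into `pats` (Python strings, here List Char),
-- then combines each expansion with every row once.
def patterns_alt (str : String) (all : List (List String)) : List (List String) :=
  let pats := str.toList.foldl
    (fun ps ch =>
      if ch = '?' then
        ps.map (fun p => p ++ ['0']) ++ ps.map (fun p => p ++ ['1'])
      else
        ps.map (fun p => p ++ [ch]))
    ([[]] : List (List Char))
  pats.flatMap (fun p => all.map (fun row => row ++ p.map (fun c => String.ofList [c])))

-- ===== PRECONDITION & SPEC =====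
def Spec_patterns (str : String) (all : List (List String)) (out : List (List String)) : Prop := out = patterns_alt str all
instance (str : String) (all : List (List String)) (out : List (List String)) : Decidable (Spec_patterns str all out) := by unfold Spec_patterns; infer_instance

-- ===== CLAIM (what is proved, stated in full; the proofs are below) =====
def Claim_equal_patterns : Prop := ∀ (str : String) (all : List (List String)), Dom_patterns str all → Spec_patterns str all (patterns str all)

-- ===== LEMMAS AND PROOFS =====

-- generic invariant for A's "set index i of the list to g i acc, for each i" loops
lemma foldl_set_inv {α : Type} (start L : List α)
    (g : ℕ → List α → α) (hL : L.length = start.length)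
    (hg : ∀ k (h : k < start.length),
      g k (L.take k ++ start.drop k) = L[k]'(by omega)) :
    ∀ m k, k + m = start.length →
      (List.range' k m).foldl (fun acc i => acc.set i (g i acc)) (L.take k ++ start.drop k) = L := by
  intro m
  induction m with
  | zero =>
    intro k hk
    simp only [List.range', List.foldl_nil]
    rw [List.drop_eq_nil_of_le (by omega), List.take_of_length_le (by omega), List.append_nil]
  | succ m ih =>
    intro k hk
    have hklt : k < start.length := by omega
    have hkL : k < L.length := by omega
    rw [List.range'_succ, List.foldl_cons]
    show (List.range' (k+1) m).foldl _ ((L.take k ++ start.drop k).set k (g k (L.take k ++ start.drop k))) = L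
    rw [hg k hklt]
    have htk : (L.take k).length = k := by simp; omega
    have hset : (L.take k ++ start.drop k).set k (L[k]'hkL)
        = L.take (k + 1) ++ start.drop (k + 1) := by
      rw [List.set_append_right _ _ (by omega), htk, Nat.sub_self,
        List.drop_eq_getElem_cons hklt, List.set_cons_zero,
        ← List.take_concat_get hkL, List.concat_eq_append,
        List.append_assoc, List.singleton_append]
    rw [hset]
    exact ih (k + 1) (by omega)

-- A's "append a copy of each row" loop duplicates the list
lemma loopDup_eq (all : List (List String)) : pvLoopDup all = all ++ all := by
  have key : ∀ m k, k + m = all.length →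
      (List.range' k m).foldl (fun acc i => acc ++ [acc.getD i []]) (all ++ all.take k)
        = all ++ all := by
    intro m
    induction m with
    | zero =>
      intro k hk
      simp only [List.range', List.foldl_nil]
      rw [List.take_of_length_le (by omega)]
    | succ m ih =>
      intro k hk
      have hklt : k < all.length := by omega
      rw [List.range'_succ, List.foldl_cons]
      show (List.range' (k+1) m).foldl _ (all ++ all.take k ++ [(all ++ all.take k).getD k []]) = _
      have hgd : (all ++ all.take k).getD k [] = all[k]'hklt := by
        rw [List.getD_append _ _ _ _ hklt, List.getD_eq_getElem _ _ hklt]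
      rw [hgd]
      have h1 : all.take k ++ [all[k]'hklt] = all.take (k + 1) := by
        rw [← List.take_concat_get hklt]; simp
      have : all ++ all.take k ++ [all[k]'hklt] = all ++ all.take (k + 1) := by
        rw [List.append_assoc, h1]
      rw [this]
      exact ih (k + 1) (by omega)
  have := key all.length 0 (by omega)
  simpa [pvLoopDup, List.range_eq_range'] using this

-- A's non-'?' loop equals B's map
lemma loopAppend_eq (c : Char) (all : List (List String)) :
    pvLoopAppend c all = all.map (fun row => row ++ [String.ofList [c]]) := by
  set L := all.map (fun row => row ++ [String.ofList [c]]) with hLdef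
  have hL : L.length = all.length := by simp [hLdef]
  have := foldl_set_inv all L
    (fun i acc => acc.getD i [] ++ [String.ofList [c]]) hL
    (by
      intro k hk
      show (L.take k ++ all.drop k).getD k [] ++ [String.ofList [c]] = L[k]'(by omega)
      have htk : (L.take k).length = k := by simp [hLdef]; omega
      rw [List.getD_append_right _ _ _ _ (by omega), htk, Nat.sub_self,
        List.drop_eq_getElem_cons hk, List.getD_cons_zero]
      simp [hLdef])
    all.length 0 (by omega)
  simpa [pvLoopAppend, List.range_eq_range'] using this

-- A's '0'/'1'-labelling loop on the duplicated list equals B's two maps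
lemma loopLabel_eq (all : List (List String)) :
    pvLoopLabel (all ++ all)
      = all.map (fun row => row ++ ["0"]) ++ all.map (fun row => row ++ ["1"]) := by
  have hL : (all.map (fun row => row ++ ["0"]) ++ all.map (fun row => row ++ ["1"])).length
      = (all ++ all).length := by simp
  have := foldl_set_inv (all ++ all)
    (all.map (fun row => row ++ ["0"]) ++ all.map (fun row => row ++ ["1"]))
    (fun i acc => if 2 * i < acc.length then acc.getD i [] ++ ["0"]
                  else acc.getD i [] ++ ["1"]) hL
    (by
      intro k hk
      have hk2 : k < 2 * all.length := by simp only [List.length_append] at hk; omega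
      set L := all.map (fun row => row ++ ["0"]) ++ all.map (fun row => row ++ ["1"]) with hLdef
      show (if 2 * k < (L.take k ++ (all ++ all).drop k).length
              then (L.take k ++ (all ++ all).drop k).getD k [] ++ ["0"]
              else (L.take k ++ (all ++ all).drop k).getD k [] ++ ["1"]) = L[k]'(by omega)
      have htk : (L.take k).length = k := by simp [hLdef]; omega
      have hlen : (L.take k ++ (all ++ all).drop k).length = 2 * all.length := by
        simp [htk]; omega
      have hgd : (L.take k ++ (all ++ all).drop k).getD k [] = (all ++ all)[k]'hk := by
        rw [List.getD_append_right _ _ _ _ (by omega), htk, Nat.sub_self,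
          List.drop_eq_getElem_cons hk, List.getD_cons_zero]
      rw [hlen, hgd]
      by_cases hhalf : k < all.length
      · have hLk : L[k]'(by omega) = all[k]'hhalf ++ ["0"] := by
          simp only [hLdef]
          rw [List.getElem_append_left (by simpa using hhalf), List.getElem_map]
        rw [if_pos (by omega), hLk, List.getElem_append_left hhalf]
      · rw [Nat.not_lt] at hhalf
        have hk3 : k - all.length < all.length := by omega
        have hLk : L[k]'(by omega) = all[k - all.length]'hk3 ++ ["1"] := by
          simp only [hLdef]
          rw [List.getElem_append_right (by simpa using hhalf)]
          simp only [List.length_map]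
          rw [List.getElem_map]
        rw [if_neg (by omega), hLk, List.getElem_append_right hhalf])
    (all ++ all).length 0 (by omega)
  simpa [pvLoopLabel, List.range_eq_range'] using this

-- B's row-building fold (the form A's loops reduce to, one generation per character)
def rowStep (out : List (List String)) (ch : Char) : List (List String) :=
  if ch = '?' then
    out.map (fun row => row ++ ["0"]) ++ out.map (fun row => row ++ ["1"])
  else
    out.map (fun row => row ++ [String.ofList [ch]])

lemma patternsA_eq (s : List Char) : ∀ all : List (List String),
    patternsA s all = s.foldl rowStep all := by
  induction s with
  | nil => intro all; rfl
  | cons c rest ih =>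
    intro all
    rw [List.foldl_cons]
    by_cases hc : c = '?'
    · subst hc
      rw [show patternsA ('?' :: rest) all
            = patternsA rest (pvLoopLabel (pvLoopDup all)) from by
          simp [patternsA]]
      rw [loopDup_eq, loopLabel_eq, ih]
      congr 1
    · rw [show patternsA (c :: rest) all = patternsA rest (pvLoopAppend c all) from by
          simp [patternsA, hc]]
      rw [loopAppend_eq, ih]
      congr 1
      simp [rowStep, hc]

-- combining each pattern with every row commutes with one generation step
lemma altFold (s : List Char) : ∀ (pats : List (List Char)) (all : List (List String)),
    (s.foldl
        (fun ps ch =>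
          if ch = '?' then ps.map (fun p => p ++ ['0']) ++ ps.map (fun p => p ++ ['1'])
          else ps.map (fun p => p ++ [ch])) pats).flatMap
      (fun p => all.map (fun row => row ++ p.map (fun c => String.ofList [c])))
    = s.foldl rowStep
        (pats.flatMap (fun p => all.map (fun row => row ++ p.map (fun c => String.ofList [c])))) := by
  induction s with
  | nil => intro pats all; rfl
  | cons c rest ih =>
    intro pats all
    rw [List.foldl_cons, List.foldl_cons, ih]
    congr 1
    by_cases hc : c = '?'
    · subst hc
      simp [rowStep, List.flatMap_append, List.map_flatMap, List.flatMap_map,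
        List.map_map, List.map_append, List.append_assoc, Function.comp_def]
    · simp [rowStep, hc, List.map_flatMap, List.flatMap_map,
        List.map_map, List.map_append, List.append_assoc, Function.comp_def]

-- ===== VERDICT (by name: the statement is the Claim_ definition above) =====
theorem patterns_spec : Claim_equal_patterns := by
  intro str all _
  show patterns str all = patterns_alt str all
  rw [patterns, patternsA_eq]
  show _ = (str.toList.foldl _ ([[]] : List (List Char))).flatMap _
  rw [altFold]
  simp
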